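-- pv_equiv track=rewrite | github.com/dbalatoni13/nfsmw | tools/dwarf-compare.py | count_lines_for_opcodes
-- ===== SOURCE A (Python) =====
-- from typing import Any, Dict, Iterable, List, Optional, Sequence, Set, Tuple
--
-- def count_lines_for_opcodes(opcodes: Sequence[Tuple[str, int, int, int, int]]) -> Dict[str, int]:
--     matching = 0
--     original_only = 0
--     rebuilt_only = 0
--     changed_groups = 0
--     for tag, i1, i2, j1, j2 in opcodes:
--         if tag == "equal":
--             matching += i2 - i1
--             continue
--         changed_groups += 1
--         if tag in ("replace", "delete"):
--             original_only += i2 - i1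
--         if tag in ("replace", "insert"):
--             rebuilt_only += j2 - j1
--     return {
--         "matching_lines": matching,
--         "original_only_lines": original_only,
--         "rebuilt_only_lines": rebuilt_only,
--         "changed_groups": changed_groups,
--     }
-- ===== SOURCE B (Python) =====
-- def count_lines_for_opcodes(opcodes):
--     return {
--         "matching_lines": sum(i2 - i1 for tag, i1, i2, j1, j2 in opcodes if tag == "equal"),
--         "original_only_lines": sum(i2 - i1 for tag, i1, i2, j1, j2 in opcodes if tag in ("replace", "delete")),
--         "rebuilt_only_lines": sum(j2 - j1 for tag, i1, i2, j1, j2 in opcodes if tag in ("replace", "insert")),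
--         "changed_groups": sum(1 for tag, i1, i2, j1, j2 in opcodes if tag != "equal"),
--     }
-- ===== Notes on version B (the rewrite author's own statement) =====
-- stated objective: simpler
-- what changed: Replaces the single loop carrying four accumulators by four independent filtered sums over the sequence, one per output key.
import Mathlib
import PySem

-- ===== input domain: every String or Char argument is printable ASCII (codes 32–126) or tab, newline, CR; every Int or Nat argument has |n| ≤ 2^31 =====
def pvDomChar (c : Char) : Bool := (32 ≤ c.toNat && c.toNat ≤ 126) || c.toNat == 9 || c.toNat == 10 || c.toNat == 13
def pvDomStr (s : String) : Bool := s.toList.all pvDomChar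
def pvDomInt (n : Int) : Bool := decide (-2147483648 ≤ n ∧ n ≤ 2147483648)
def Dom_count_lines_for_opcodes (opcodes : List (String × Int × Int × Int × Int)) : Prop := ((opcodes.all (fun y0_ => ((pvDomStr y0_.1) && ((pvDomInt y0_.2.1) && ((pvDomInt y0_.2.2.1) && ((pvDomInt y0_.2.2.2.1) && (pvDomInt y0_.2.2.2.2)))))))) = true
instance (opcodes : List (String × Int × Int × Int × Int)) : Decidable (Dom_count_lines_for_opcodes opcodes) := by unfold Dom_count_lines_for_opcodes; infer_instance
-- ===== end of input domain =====

-- B replaces the single loop with four accumulators by four independent filtered sums (simpler decomposition).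
-- ===== PORT A =====
def pvStepA (acc : Int × Int × Int × Int) (t : String × Int × Int × Int × Int) : Int × Int × Int × Int :=
  let (m, o, r, c) := acc
  let (tag, i1, i2, j1, j2) := t
  if tag == "equal" then (m + (i2 - i1), o, r, c)
  else
    let c := c + 1
    let o := if tag == "replace" || tag == "delete" then o + (i2 - i1) else o
    let r := if tag == "replace" || tag == "insert" then r + (j2 - j1) else r
    (m, o, r, c)

def count_lines_for_opcodes (opcodes : List (String × Int × Int × Int × Int)) : List (String × Int) :=
  let s := opcodes.foldl pvStepA (0, 0, 0, 0)
  [("matching_lines", s.1), ("original_only_lines", s.2.1),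
   ("rebuilt_only_lines", s.2.2.1), ("changed_groups", s.2.2.2)]

-- ===== PORT B =====
def count_lines_for_opcodes_alt (opcodes : List (String × Int × Int × Int × Int)) : List (String × Int) :=
  [("matching_lines",
      ((opcodes.filter (fun t => t.1 == "equal")).map (fun t => t.2.2.1 - t.2.1)).sum),
   ("original_only_lines",
      ((opcodes.filter (fun t => t.1 == "replace" || t.1 == "delete")).map (fun t => t.2.2.1 - t.2.1)).sum),
   ("rebuilt_only_lines",
      ((opcodes.filter (fun t => t.1 == "replace" || t.1 == "insert")).map (fun t => t.2.2.2.2 - t.2.2.2.1)).sum),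
   ("changed_groups",
      ((opcodes.filter (fun t => !(t.1 == "equal"))).map (fun _ => (1 : Int))).sum)]

-- ===== PRECONDITION & SPEC =====
def Spec_count_lines_for_opcodes (opcodes : List (String × Int × Int × Int × Int)) (out : List (String × Int)) : Prop := out = count_lines_for_opcodes_alt opcodes
instance (opcodes : List (String × Int × Int × Int × Int)) (out : List (String × Int)) : Decidable (Spec_count_lines_for_opcodes opcodes out) := by unfold Spec_count_lines_for_opcodes; infer_instance

-- ===== CLAIM (what is proved, stated in full; the proofs are below) =====
def Claim_equal_count_lines_for_opcodes : Prop := ∀ (opcodes : List (String × Int × Int × Int × Int)), Dom_count_lines_for_opcodes opcodes → Spec_count_lines_for_opcodes opcodes (count_lines_for_opcodes opcodes)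

-- ===== LEMMAS AND PROOFS =====

lemma pvFoldA_char (l : List (String × Int × Int × Int × Int)) (m o r c : Int) :
    l.foldl pvStepA (m, o, r, c) =
      (m + ((l.filter (fun t => t.1 == "equal")).map (fun t => t.2.2.1 - t.2.1)).sum,
       o + ((l.filter (fun t => t.1 == "replace" || t.1 == "delete")).map (fun t => t.2.2.1 - t.2.1)).sum,
       r + ((l.filter (fun t => t.1 == "replace" || t.1 == "insert")).map (fun t => t.2.2.2.2 - t.2.2.2.1)).sum,
       c + ((l.filter (fun t => !(t.1 == "equal"))).map (fun _ => (1 : Int))).sum) := by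
  induction l generalizing m o r c with
  | nil => simp
  | cons h tl ih =>
    obtain ⟨tag, i1, i2, j1, j2⟩ := h
    by_cases he : tag = "equal"
    · subst he
      simp [pvStepA, List.foldl_cons, ih]
      ring
    · simp only [List.foldl_cons, pvStepA]
      rw [if_neg (by simpa using he)]
      rw [ih]
      by_cases hr : tag = "replace" <;> by_cases hd : tag = "delete" <;> by_cases hi : tag = "insert" <;>
        simp_all [Prod.ext_iff] <;> omega

-- ===== VERDICT (by name: the statement is the Claim_ definition above) =====
theorem count_lines_for_opcodes_spec : Claim_equal_count_lines_for_opcodes := by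
  intro opcodes _
  unfold Spec_count_lines_for_opcodes count_lines_for_opcodes count_lines_for_opcodes_alt
  rw [pvFoldA_char]
  simp
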